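-- pv_equiv track=rewrite | github.com/alishalabi/practice_2024 | coding_problems/first_letter_shift.py | shift_sentence
-- ===== SOURCE A (Python) =====
-- def shift_sentence(string):
--     ret = ""
--     parsed_array = string.split()
--     if len(parsed_array) < 2:
--         return string
--     for index in range(len(parsed_array)):
--         if index == 0:
--             new_word = parsed_array[-1][0] + parsed_array[index][1:]
--             ret += new_word
--         else:
--             new_word = parsed_array[index - 1][0] + parsed_array[index][1:]
--             ret += " " + new_word
--     return ret
-- ===== SOURCE B (Python) =====
-- def shift_sentence(string):
--     words = string.split()
--     if len(words) < 2:
--         return string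
--     chars = list(" ".join(words))
--     pos = 0
--     prev = words[-1][0]
--     for w in words:
--         chars[pos] = prev
--         prev = w[0]
--         pos += len(w) + 1
--     return "".join(chars)
-- ===== Notes on version B (the rewrite author's own statement) =====
-- stated objective: alternative
-- what changed: Instead of reassembling each output word from its neighbour's first letter, B flattens the sentence once into a mutable character buffer of the normalized join and patches that buffer in place at arithmetically computed word-start offsets, carrying the previous first letter through a cursor.
import Mathlib
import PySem

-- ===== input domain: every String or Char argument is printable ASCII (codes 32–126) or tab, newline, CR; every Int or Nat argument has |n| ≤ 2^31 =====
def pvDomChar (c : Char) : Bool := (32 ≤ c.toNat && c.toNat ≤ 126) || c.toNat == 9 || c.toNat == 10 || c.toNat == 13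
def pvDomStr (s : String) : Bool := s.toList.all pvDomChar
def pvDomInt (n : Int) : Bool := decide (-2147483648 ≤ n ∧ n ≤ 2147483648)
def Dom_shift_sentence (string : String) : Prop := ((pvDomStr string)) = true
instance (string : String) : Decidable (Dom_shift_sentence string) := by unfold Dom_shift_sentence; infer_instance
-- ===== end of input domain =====

-- B flattens the sentence once into the character buffer of the normalized " ".join and
-- patches that buffer in place at computed word-start offsets (carrying the previous first
-- letter through a cursor), instead of A's per-word string reassembly: alternative algorithm.


-- w[0] as a one-character string; the "" default is never taken, since split() words are nonempty
def pvFirst (w : String) : String := ((PySem.Str.pyGet? w 0).map (fun c => String.ofList [c])).getD ""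

-- ===== PORT A =====
def shift_sentence (string : String) : String :=
  let ret : String := ""
  let parsed_array := PySem.Str.split₀ string
  if parsed_array.length < 2 then string
  else
    (PySem.List.pyRange 0 parsed_array.length 1).foldl
      (fun ret index =>
        if index = 0 then
          ret ++ (pvFirst (PySem.List.pyGetD parsed_array (-1) "") ++
                  PySem.Str.slice (PySem.List.pyGetD parsed_array index "") (some 1) none)
        else
          ret ++ " " ++ (pvFirst (PySem.List.pyGetD parsed_array (index - 1) "") ++
                  PySem.Str.slice (PySem.List.pyGetD parsed_array index "") (some 1) none))
      ret

-- ===== PORT B =====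
-- the ' ' defaults of the w[0] lookups are never taken: split() words are nonempty
def shift_sentence_alt (string : String) : String :=
  let words := PySem.Str.split₀ string
  if words.length < 2 then string
  else
    let chars := (PySem.Str.join " " words).toList
    let st := words.foldl
      (fun (s : List Char × Int × Char) w =>
        (PySem.List.pySetD s.1 s.2.1 s.2.2,
         s.2.1 + PySem.Str.len w + 1,
         (PySem.Str.pyGet? w 0).getD ' '))
      (chars, 0, (PySem.Str.pyGet? (PySem.List.pyGetD words (-1) "") 0).getD ' ')
    String.ofList st.1

-- ===== PRECONDITION & SPEC =====
def Spec_shift_sentence (string : String) (out : String) : Prop := out = shift_sentence_alt string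
instance (string : String) (out : String) : Decidable (Spec_shift_sentence string out) := by unfold Spec_shift_sentence; infer_instance

-- ===== CLAIM (what is proved, stated in full; the proofs are below) =====
def Claim_equal_shift_sentence : Prop := ∀ (string : String), Dom_shift_sentence string → Spec_shift_sentence string (shift_sentence string)

-- ===== LEMMAS AND PROOFS =====

-- the word A's loop emits at index i (0-case folded into one function)
def pvG (ws : List String) (i : Int) : String :=
  (if i = 0 then pvFirst (PySem.List.pyGetD ws (-1) "")
   else pvFirst (PySem.List.pyGetD ws (i - 1) "")) ++
  PySem.Str.slice (PySem.List.pyGetD ws i "") (some 1) none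

-- the shifted word list as character lists, carrying the previous word's first letter
def pvShift (p : Char) : List String → List (List Char)
  | [] => []
  | w :: t => (p :: w.toList.tail) :: pvShift (w.toList.headD ' ') t

theorem chars_join_append_singleton (sep y : List Char) (xs : List (List Char)) (h : xs ≠ []) :
    PySem.Chars.join sep (xs ++ [y]) = PySem.Chars.join sep xs ++ sep ++ y := by
  induction xs with
  | nil => exact absurd rfl h
  | cons a t ih =>
    cases t with
    | nil =>
      simp [PySem.Chars.join_cons_cons, PySem.Chars.join_singleton]
    | cons b t' =>
      rw [List.cons_append, PySem.Chars.join_cons_cons, List.cons_append,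
        PySem.Chars.join_cons_cons]
      rw [show b :: (t' ++ [y]) = (b :: t') ++ [y] by simp, ih (by simp)]
      simp [List.append_assoc]

theorem str_join_append_singleton (sep y : String) (xs : List String) (h : xs ≠ []) :
    PySem.Str.join sep (xs ++ [y]) = PySem.Str.join sep xs ++ sep ++ y := by
  apply String.toList_inj.mp
  simp only [PySem.Str.toList_join, String.toList_append, List.map_append, List.map_cons,
    List.map_nil]
  exact chars_join_append_singleton _ _ _ (by simpa using h)

theorem str_join_singleton (sep y : String) : PySem.Str.join sep [y] = y := by
  apply String.toList_inj.mp
  simp [PySem.Str.toList_join, PySem.Chars.join_singleton]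

theorem fold_join (g : Int → String) (n : Nat) (hn : 1 ≤ n) :
    (PySem.List.pyRange 0 (n : Int) 1).foldl
      (fun acc i => if i = 0 then acc ++ g i else acc ++ " " ++ g i) ""
    = PySem.Str.join " " ((List.range n).map (fun (k : Nat) => g (k : Int))) := by
  induction n with
  | zero => omega
  | succ m ih =>
    by_cases hm : m = 0
    · subst hm
      rw [PySem.List.pyRange_one_cons (by norm_num)]
      have : PySem.List.pyRange (0 + 1 : Int) (1 : Nat) 1 = [] := by
        norm_num [PySem.List.pyRange]
      rw [this]
      simp [str_join_singleton, List.range_succ]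
    · have h1 : (1 : Nat) ≤ m := Nat.one_le_iff_ne_zero.mpr hm
      have hsplit : PySem.List.pyRange 0 ((m + 1 : Nat) : Int) 1
          = PySem.List.pyRange 0 (m : Int) 1 ++ PySem.List.pyRange (m : Int) ((m + 1 : Nat) : Int) 1 := by
        exact_mod_cast PySem.List.pyRange_one_append 0 (m : Int) ((m : Int) + 1)
          (by positivity) (by omega)
      have hlast : PySem.List.pyRange (m : Int) ((m + 1 : Nat) : Int) 1 = [(m : Int)] := by
        rw [show ((m + 1 : Nat) : Int) = (m : Int) + 1 by push_cast; ring]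
        rw [PySem.List.pyRange_one_cons (by omega)]
        norm_num [PySem.List.pyRange]
      rw [hsplit, hlast, List.foldl_append, ih h1]
      have hne : ((m : Int)) ≠ 0 := by exact_mod_cast hm
      simp only [List.foldl_cons, List.foldl_nil, if_neg hne]
      rw [List.range_succ, List.map_append, List.map_cons, List.map_nil,
        str_join_append_singleton _ _ _ (by simp; omega)]

-- every word produced by split() is a nonempty character list
theorem split₀_go_ne_nil (rest : List Char) (cur : List Char) (acc : List (List Char))
    (hacc : ∀ w ∈ acc, w ≠ []) :
    ∀ w ∈ PySem.Chars.split₀.go rest cur acc, w ≠ [] := by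
  induction rest generalizing cur acc with
  | nil =>
    intro w hw
    by_cases hc : cur.isEmpty
    · simp only [PySem.Chars.split₀.go, hc, if_true, List.mem_reverse] at hw
      exact hacc w hw
    · simp only [PySem.Chars.split₀.go, if_neg hc, List.reverse_cons, List.mem_append,
        List.mem_reverse, List.mem_singleton] at hw
      rcases hw with h | h
      · exact hacc w h
      · subst h
        simp only [ne_eq, List.reverse_eq_nil_iff]
        simpa [List.isEmpty_iff] using hc
  | cons c rest ih =>
    intro w hw
    by_cases hs : PySem.Chars.isspace c
    · by_cases hc : cur.isEmpty
      · simp only [PySem.Chars.split₀.go, hs, hc, if_true] at hw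
        exact ih [] acc hacc w hw
      · simp only [PySem.Chars.split₀.go, hs, hc, if_true, Bool.false_eq_true, if_false] at hw
        refine ih [] (cur.reverse :: acc) ?_ w hw
        intro u hu
        rcases List.mem_cons.mp hu with h | h
        · subst h
          simp only [ne_eq, List.reverse_eq_nil_iff]
          simpa [List.isEmpty_iff] using hc
        · exact hacc u h
    · simp only [PySem.Chars.split₀.go, hs, Bool.false_eq_true, if_false] at hw
      exact ih (c :: cur) acc hacc w hw

theorem split₀_words_ne_nil (s : String) :
    ∀ w ∈ PySem.Str.split₀ s, w.toList ≠ [] := by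
  intro w hw
  simp only [PySem.Str.split₀, List.mem_map] at hw
  obtain ⟨u, hu, rfl⟩ := hw
  rw [String.toList_ofList]
  exact split₀_go_ne_nil s.toList [] [] (by simp) u hu

theorem length_pvShift (p : Char) (ws : List String) : (pvShift p ws).length = ws.length := by
  induction ws generalizing p with
  | nil => rfl
  | cons w t ih => simp [pvShift, ih]

theorem getElem_pvShift (p : Char) (ws : List String) (k : Nat) (hk : k < ws.length)
    (hk' : k < (pvShift p ws).length) :
    (pvShift p ws)[k] =
      (if k = 0 then p else ws[k-1]'(by omega) |>.toList.headD ' ') ::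
        (ws[k].toList.tail) := by
  induction ws generalizing p k with
  | nil => simp at hk
  | cons w t ih =>
    cases k with
    | zero => simp [pvShift]
    | succ j =>
      have hj : j < t.length := by simpa using hk
      simp only [pvShift, List.getElem_cons_succ]
      rw [ih (w.toList.headD ' ') j hj (by simpa [length_pvShift] using hj)]
      cases j with
      | zero => simp
      | succ i => simp

-- A's word list, as character lists, is exactly pvShift started at the last word's first letter
theorem range_map_pvG_eq_pvShift (ws : List String) (h2 : 2 ≤ ws.length)
    (hne : ∀ w ∈ ws, w.toList ≠ []) :
    ((List.range ws.length).map (fun (k : Nat) => pvG ws (k : Int))).map String.toList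
      = pvShift ((PySem.List.pyGetD ws (-1) "").toList.headD ' ') ws := by
  have hwsne : ws ≠ [] := by intro h; simp [h] at h2
  apply List.ext_getElem
  · simp [length_pvShift]
  · intro k hk1 hk2
    have hk : k < ws.length := by simpa using hk1
    rw [getElem_pvShift _ _ k hk (by simpa using hk2)]
    simp only [List.getElem_map, List.getElem_range]
    have hfirst : ∀ (w : String), w.toList ≠ [] →
        (pvFirst w).toList = [w.toList.headD ' '] := by
      intro w hw
      obtain ⟨c, cs, hccs⟩ := List.exists_cons_of_ne_nil hw
      simp [pvFirst, hccs]
    have htail : ∀ (w : String),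
        (PySem.Str.slice w (some 1) none).toList = w.toList.tail := by
      intro w
      simp [PySem.Str.toList_slice, PySem.List.slice_from_one]
    cases k with
    | zero =>
      have hlast : PySem.List.pyGetD ws (-1) "" ∈ ws :=
        PySem.List.pyGetD_mem ws "" (by simp [PySem.Raise.InRange]; omega)
      simp only [pvG, Nat.cast_zero, String.toList_append, htail, if_true]
      rw [hfirst _ (hne _ hlast)]
      simp [pysem, hk]
    | succ j =>
      have h0 : ((j + 1 : Nat) : Int) ≠ 0 := by omega
      have hc : ((j + 1 : Nat) : Int) - 1 = ((j : Nat) : Int) := by push_cast; ring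
      simp only [pvG, if_neg h0, hc, String.toList_append, htail,
        PySem.List.pyGetD_natCast]
      have hjlt : j < ws.length := by omega
      have hj1 : ws.getD j "" = ws[j] := List.getD_eq_getElem _ _ hjlt
      have hj2 : ws.getD (j+1) "" = ws[j+1] := List.getD_eq_getElem _ _ (by omega)
      rw [hj1, hj2, hfirst _ (hne _ (List.getElem_mem hjlt))]
      simp

-- setting position pre.length of pre ++ c :: rest replaces c
theorem set_append_length {α : Type} (pre rest : List α) (c v : α) :
    (pre ++ c :: rest).set pre.length v = pre ++ v :: rest := by
  induction pre with
  | nil => simp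
  | cons a t ih => simp [ih]

-- B's buffer-patching fold, with an already-finished prefix in front
theorem fold_patch (ws : List String) (hne : ∀ w ∈ ws, w.toList ≠ []) (pre : List Char) (p : Char) :
    (ws.foldl
      (fun (s : List Char × Int × Char) w =>
        (PySem.List.pySetD s.1 s.2.1 s.2.2,
         s.2.1 + PySem.Str.len w + 1,
         (PySem.Str.pyGet? w 0).getD ' '))
      (pre ++ PySem.Chars.join [' '] (ws.map String.toList), (pre.length : Int), p)).1
    = pre ++ PySem.Chars.join [' '] (pvShift p ws) := by
  induction ws generalizing pre p with
  | nil => simp [pvShift, PySem.Chars.join]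
  | cons w t ih =>
    obtain ⟨c, cs, hccs⟩ := List.exists_cons_of_ne_nil (hne w (by simp))
    have hget : (PySem.Str.pyGet? w 0).getD ' ' = c := by
      simp [hccs]
    have hlenw : PySem.Str.len w = ((cs.length + 1 : Nat) : Int) := by
      rw [PySem.Str.len_eq, hccs]; simp
    cases t with
    | nil =>
      simp only [List.map_cons, List.map_nil, PySem.Chars.join_singleton,
        List.foldl_cons, List.foldl_nil, pvShift, hccs]
      rw [PySem.List.pySetD_natCast, set_append_length]
      simp
    | cons w2 t' =>
      have hjoin : PySem.Chars.join [' '] ((w :: w2 :: t').map String.toList)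
          = w.toList ++ ' ' :: PySem.Chars.join [' '] ((w2 :: t').map String.toList) := by
        simp [PySem.Chars.join_cons_cons]
      rw [hjoin, List.foldl_cons]
      have hset : PySem.List.pySetD
          (pre ++ (w.toList ++ ' ' :: PySem.Chars.join [' '] ((w2 :: t').map String.toList)))
          (pre.length : Int) p
          = (pre ++ p :: cs ++ [' ']) ++ PySem.Chars.join [' '] ((w2 :: t').map String.toList) := by
        rw [PySem.List.pySetD_natCast, hccs]
        rw [show pre ++ (c :: cs ++ ' ' :: PySem.Chars.join [' '] ((w2 :: t').map String.toList))
            = pre ++ c :: (cs ++ ' ' :: PySem.Chars.join [' '] ((w2 :: t').map String.toList)) by simp]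
        rw [set_append_length]
        simp
      have hpos : (pre.length : Int) + PySem.Str.len w + 1
          = (((pre ++ p :: cs ++ [' ']).length : Nat) : Int) := by
        rw [hlenw]; simp; ring
      rw [hset, hget, hpos]
      rw [ih (fun u hu => hne u (by simp [hu])) (pre ++ p :: cs ++ [' ']) c]
      have hpv : pvShift p (w :: w2 :: t') = (p :: cs) :: pvShift c (w2 :: t') := by
        simp [pvShift, hccs]
      rw [hpv]
      have hjoin2 : PySem.Chars.join [' '] ((p :: cs) :: pvShift c (w2 :: t'))
          = (p :: cs) ++ ' ' :: PySem.Chars.join [' '] (pvShift c (w2 :: t')) := by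
        have : pvShift c (w2 :: t') = (c :: w2.toList.tail) :: pvShift (w2.toList.headD ' ') t' := by
          simp [pvShift]
        rw [this, PySem.Chars.join_cons_cons]
        simp
      rw [hjoin2]
      simp

theorem shift_main (string : String) : shift_sentence string = shift_sentence_alt string := by
  unfold shift_sentence shift_sentence_alt
  by_cases h : (PySem.Str.split₀ string).length < 2
  · simp [h]
  · simp only [if_neg h]
    set ws := PySem.Str.split₀ string with hws
    have h2 : 2 ≤ ws.length := by omega
    have hne : ∀ w ∈ ws, w.toList ≠ [] := split₀_words_ne_nil string
    have hwsne : ws ≠ [] := by intro hh; simp [hh] at h2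
    -- A side: the fold is a join of pvG over the index range
    have hbody : (fun (ret : String) (index : Int) =>
        if index = 0 then
          ret ++ (pvFirst (PySem.List.pyGetD ws (-1) "") ++
                  PySem.Str.slice (PySem.List.pyGetD ws index "") (some 1) none)
        else
          ret ++ " " ++ (pvFirst (PySem.List.pyGetD ws (index - 1) "") ++
                  PySem.Str.slice (PySem.List.pyGetD ws index "") (some 1) none))
        = (fun acc i => if i = 0 then acc ++ pvG ws i else acc ++ " " ++ pvG ws i) := by
      funext acc i
      by_cases hi : i = 0 <;> simp [pvG, hi]
    rw [hbody, fold_join (pvG ws) ws.length (by omega)]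
    -- B side: the initial prev character
    have hp : (PySem.Str.pyGet? (PySem.List.pyGetD ws (-1) "") 0).getD ' '
        = (PySem.List.pyGetD ws (-1) "").toList.headD ' ' := by
      have hlast : PySem.List.pyGetD ws (-1) "" ∈ ws :=
        PySem.List.pyGetD_mem ws "" (by simp [PySem.Raise.InRange]; omega)
      obtain ⟨c, cs, hccs⟩ := List.exists_cons_of_ne_nil (hne _ hlast)
      simp [hccs]
    have hchars : (PySem.Str.join " " ws).toList
        = PySem.Chars.join [' '] (ws.map String.toList) := by
      simp [PySem.Str.toList_join]
    rw [show ((PySem.Str.join " " ws).toList, (0 : Int),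
          (PySem.Str.pyGet? (PySem.List.pyGetD ws (-1) "") 0).getD ' ')
        = (([] : List Char) ++ PySem.Chars.join [' '] (ws.map String.toList),
           ((([] : List Char).length : Nat) : Int),
           (PySem.List.pyGetD ws (-1) "").toList.headD ' ') from by
      rw [hp, hchars]; simp]
    rw [fold_patch ws hne [] ((PySem.List.pyGetD ws (-1) "").toList.headD ' ')]
    apply String.toList_inj.mp
    rw [String.toList_ofList, PySem.Str.toList_join]
    rw [range_map_pvG_eq_pvShift ws h2 hne]
    rfl

-- ===== VERDICT (by name: the statement is the Claim_ definition above) =====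
theorem shift_sentence_spec : Claim_equal_shift_sentence := by
  intro s _
  unfold Spec_shift_sentence
  exact shift_main s
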